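-- pv_equiv track=rewrite | github.com/aaryan84/Python | verify_password.py | verify_password_criteria
-- ===== SOURCE A (Python) =====
-- def verify_password_criteria(password):
--
--     min_length = 8
--     max_length = 15
--     special_characters = "!@#$%^&*()-+?_=,<>/"
--
--     if len(password) < min_length or len(password) > max_length:
--         return "Must be between 8 and 15 characters long."
--
--     if not any(char.isupper() for char in password):
--         return "Must contain at least one uppercase letter."
--
--     if not any(char.islower() for char in password):
--         return "Must contain at least one lowercase letter."
--
--     if not any(char.isdigit() for char in password):
--         return "Must contain at least one digit."
--
--     if not any(char in special_characters for char in password):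
--         return "<ust contain at least one special character."
--
--     return "Valid password."
-- ===== SOURCE B (Python) =====
-- def verify_password_criteria(password):
--     special_characters = "!@#$%^&*()-+?_=,<>/"
--     has_upper = has_lower = has_digit = has_special = False
--     for char in password:
--         has_upper = has_upper or char.isupper()
--         has_lower = has_lower or char.islower()
--         has_digit = has_digit or char.isdigit()
--         has_special = has_special or (char in special_characters)
--
--     if len(password) < 8 or len(password) > 15:
--         return "Must be between 8 and 15 characters long."
--     if not has_upper:
--         return "Must contain at least one uppercase letter."
--     if not has_lower:
--         return "Must contain at least one lowercase letter."
--     if not has_digit: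
--         return "Must contain at least one digit."
--     if not has_special:
--         return "<ust contain at least one special character."
--     return "Valid password."
-- ===== Notes on version B (the rewrite author's own statement) =====
-- stated objective: simpler
-- what changed: Replaces A's four separate any(...) generator scans with one pass over the password that accumulates four booleans, then checks length and the booleans in A's order with the exact same messages.
import Mathlib
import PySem

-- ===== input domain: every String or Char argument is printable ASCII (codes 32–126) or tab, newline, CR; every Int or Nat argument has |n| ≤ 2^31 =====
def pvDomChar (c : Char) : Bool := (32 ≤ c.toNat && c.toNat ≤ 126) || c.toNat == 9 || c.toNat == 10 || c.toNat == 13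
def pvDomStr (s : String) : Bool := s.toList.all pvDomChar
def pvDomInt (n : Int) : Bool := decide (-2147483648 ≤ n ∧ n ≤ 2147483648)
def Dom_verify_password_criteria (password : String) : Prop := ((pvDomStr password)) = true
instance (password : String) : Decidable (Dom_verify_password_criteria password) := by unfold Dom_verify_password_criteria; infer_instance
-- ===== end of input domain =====

-- B fuses A's four separate any(...) scans into one pass accumulating four booleans (simpler; same messages and check order).


-- ===== PORT A =====
def verify_password_criteria (password : String) : String :=
  let min_length : Int := 8
  let max_length : Int := 15
  let special_characters : String := "!@#$%^&*()-+?_=,<>/"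
  if (PySem.Str.len password < min_length) || (PySem.Str.len password > max_length) then
    "Must be between 8 and 15 characters long."
  else if !(password.toList.any (fun c => PySem.Chars.isupper c)) then
    "Must contain at least one uppercase letter."
  else if !(password.toList.any (fun c => PySem.Chars.islower c)) then
    "Must contain at least one lowercase letter."
  else if !(password.toList.any (fun c => PySem.Chars.isdigit c)) then
    "Must contain at least one digit."
  else if !(password.toList.any (fun c => special_characters.toList.contains c)) then
    "<ust contain at least one special character."
  else
    "Valid password."

-- ===== PORT B =====
def verify_password_criteria_alt (password : String) : String :=
  let special_characters : String := "!@#$%^&*()-+?_=,<>/"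
  let st : Bool × Bool × Bool × Bool :=
    password.toList.foldl
      (fun acc c =>
        (acc.1 || PySem.Chars.isupper c,
         acc.2.1 || PySem.Chars.islower c,
         acc.2.2.1 || PySem.Chars.isdigit c,
         acc.2.2.2 || special_characters.toList.contains c))
      (false, false, false, false)
  if (PySem.Str.len password < 8) || (PySem.Str.len password > 15) then
    "Must be between 8 and 15 characters long."
  else if !st.1 then
    "Must contain at least one uppercase letter."
  else if !st.2.1 then
    "Must contain at least one lowercase letter."
  else if !st.2.2.1 then
    "Must contain at least one digit."
  else if !st.2.2.2 then
    "<ust contain at least one special character."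
  else
    "Valid password."

-- ===== PRECONDITION & SPEC =====
def Spec_verify_password_criteria (password : String) (out : String) : Prop := out = verify_password_criteria_alt password
instance (password : String) (out : String) : Decidable (Spec_verify_password_criteria password out) := by unfold Spec_verify_password_criteria; infer_instance

-- ===== CLAIM (what is proved, stated in full; the proofs are below) =====
def Claim_equal_verify_password_criteria : Prop := ∀ (password : String), Dom_verify_password_criteria password → Spec_verify_password_criteria password (verify_password_criteria password)

-- ===== LEMMAS AND PROOFS =====
theorem pv_fold_flags (sp : List Char) (l : List Char) (a b c d : Bool) :
    l.foldl
      (fun (acc : Bool × Bool × Bool × Bool) ch =>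
        (acc.1 || PySem.Chars.isupper ch,
         acc.2.1 || PySem.Chars.islower ch,
         acc.2.2.1 || PySem.Chars.isdigit ch,
         acc.2.2.2 || sp.contains ch))
      (a, b, c, d)
    = (a || l.any (fun ch => PySem.Chars.isupper ch),
       b || l.any (fun ch => PySem.Chars.islower ch),
       c || l.any (fun ch => PySem.Chars.isdigit ch),
       d || l.any (fun ch => sp.contains ch)) := by
  induction l generalizing a b c d with
  | nil => simp
  | cons x xs ih =>
    simp only [List.foldl_cons, ih, List.any_cons]
    simp [Bool.or_assoc]

-- ===== VERDICT (by name: the statement is the Claim_ definition above) =====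
theorem verify_password_criteria_spec : Claim_equal_verify_password_criteria := by
  intro password _
  unfold Spec_verify_password_criteria verify_password_criteria verify_password_criteria_alt
  simp only [pv_fold_flags, Bool.false_or]
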